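-- pv_equiv track=rewrite | github.com/krishngokulv/SOC-AI-Agent | backend/agent/correlator.py | _analyze_verdicts
-- ===== SOURCE A (Python) =====
-- from typing import List, Dict, Optional
--
-- def _analyze_verdicts(related: List[Dict]) -> Dict:
--     """Analyze verdict distribution of related investigations."""
--     verdicts = {
--         "TRUE_POSITIVE": 0,
--         "FALSE_POSITIVE": 0,
--         "NEEDS_ESCALATION": 0,
--         "pending": 0,
--     }
--
--     for inv in related:
--         verdict = inv.get("verdict")
--         if verdict in verdicts:
--             verdicts[verdict] += 1
--         else:
--             verdicts["pending"] += 1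
--
--     return verdicts
-- ===== SOURCE B (Python) =====
-- from typing import List, Dict, Optional
--
-- def _analyze_verdicts(related: List[Dict]) -> Dict:
--     """Analyze verdict distribution: tabulate per-category counts, derive pending by subtraction."""
--     vs = [inv.get("verdict") for inv in related]
--     tp = vs.count("TRUE_POSITIVE")
--     fp = vs.count("FALSE_POSITIVE")
--     ne = vs.count("NEEDS_ESCALATION")
--     return {
--         "TRUE_POSITIVE": tp,
--         "FALSE_POSITIVE": fp,
--         "NEEDS_ESCALATION": ne,
--         "pending": len(related) - tp - fp - ne,
--     }
-- ===== Notes on version B (the rewrite author's own statement) =====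
-- stated objective: simpler
-- what changed: B replaces A's per-element membership-branch loop over a mutable counts dict by three direct per-category counts over the extracted verdict list, deriving the pending bucket arithmetically as len(related) minus the three known counts.
import Mathlib
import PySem

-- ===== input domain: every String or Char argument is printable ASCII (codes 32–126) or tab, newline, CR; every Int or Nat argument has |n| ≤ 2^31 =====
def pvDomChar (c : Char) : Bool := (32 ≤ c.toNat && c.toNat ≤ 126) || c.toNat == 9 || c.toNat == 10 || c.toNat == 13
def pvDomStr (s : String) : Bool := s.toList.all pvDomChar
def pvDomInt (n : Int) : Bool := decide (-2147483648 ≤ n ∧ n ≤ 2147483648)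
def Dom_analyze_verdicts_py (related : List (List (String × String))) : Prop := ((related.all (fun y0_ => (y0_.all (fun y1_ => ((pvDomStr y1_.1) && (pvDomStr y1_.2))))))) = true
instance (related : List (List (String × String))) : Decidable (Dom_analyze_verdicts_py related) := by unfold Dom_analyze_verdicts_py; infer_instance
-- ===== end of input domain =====

-- B replaces A's per-element membership-branch loop with three direct category counts and a
-- subtraction-derived "pending" bucket (objective: simpler).

-- ===== PORT A =====
def analyze_verdicts_py (related : List (List (String × String))) : List (String × Int) :=
  let verdicts : PySem.Dict String Int :=
    PySem.Dict.ofList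
      [("TRUE_POSITIVE", 0), ("FALSE_POSITIVE", 0), ("NEEDS_ESCALATION", 0), ("pending", 0)]
  let verdicts := related.foldl (fun d inv =>
    let verdict := (PySem.Dict.mk inv).get? "verdict"
    match verdict with
    | some v => if d.contains v then d.modify v 0 (· + 1) else d.modify "pending" 0 (· + 1)
    | none => d.modify "pending" 0 (· + 1)) verdicts
  verdicts.items

-- ===== PORT B =====
def analyze_verdicts_py_alt (related : List (List (String × String))) : List (String × Int) :=
  let vs := related.map (fun inv => (PySem.Dict.mk inv).get? "verdict")
  let tp : Int := PySem.List.count vs (some "TRUE_POSITIVE")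
  let fp : Int := PySem.List.count vs (some "FALSE_POSITIVE")
  let ne : Int := PySem.List.count vs (some "NEEDS_ESCALATION")
  [("TRUE_POSITIVE", tp), ("FALSE_POSITIVE", fp), ("NEEDS_ESCALATION", ne),
   ("pending", (related.length : Int) - tp - fp - ne)]

-- ===== PRECONDITION & SPEC =====
def Spec_analyze_verdicts_py (related : List (List (String × String))) (out : List (String × Int)) : Prop := out = analyze_verdicts_py_alt related
instance (related : List (List (String × String))) (out : List (String × Int)) : Decidable (Spec_analyze_verdicts_py related out) := by unfold Spec_analyze_verdicts_py; infer_instance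

-- ===== CLAIM (what is proved, stated in full; the proofs are below) =====
def Claim_equal_analyze_verdicts_py : Prop := ∀ (related : List (List (String × String))), Dom_analyze_verdicts_py related → Spec_analyze_verdicts_py related (analyze_verdicts_py related)

-- ===== LEMMAS AND PROOFS =====

-- the 4-entry dict state of A's loop, parameterised by its four counts
def pvD (a b c p : Int) : PySem.Dict String Int :=
  PySem.Dict.mk
    [("TRUE_POSITIVE", a), ("FALSE_POSITIVE", b), ("NEEDS_ESCALATION", c), ("pending", p)]

def pvG (inv : List (String × String)) : Option String := (PySem.Dict.mk inv).get? "verdict"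

def pvStep (d : PySem.Dict String Int) (inv : List (String × String)) : PySem.Dict String Int :=
  match (PySem.Dict.mk inv).get? "verdict" with
  | some v => if d.contains v then d.modify v 0 (· + 1) else d.modify "pending" 0 (· + 1)
  | none => d.modify "pending" 0 (· + 1)

lemma pvStep_tp {inv : List (String × String)} (h : pvG inv = some "TRUE_POSITIVE")
    (a b c p : Int) : pvStep (pvD a b c p) inv = pvD (a + 1) b c p := by
  unfold pvStep
  rw [show (PySem.Dict.mk inv).get? "verdict" = some "TRUE_POSITIVE" from h]
  simp [pvD, PySem.Dict.modify, PySem.Dict.contains, PySem.Dict.getD, PySem.Dict.get?,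
    PySem.Dict.insert]

lemma pvStep_fp {inv : List (String × String)} (h : pvG inv = some "FALSE_POSITIVE")
    (a b c p : Int) : pvStep (pvD a b c p) inv = pvD a (b + 1) c p := by
  unfold pvStep
  rw [show (PySem.Dict.mk inv).get? "verdict" = some "FALSE_POSITIVE" from h]
  simp [pvD, PySem.Dict.modify, PySem.Dict.contains, PySem.Dict.getD, PySem.Dict.get?,
    PySem.Dict.insert]

lemma pvStep_ne {inv : List (String × String)} (h : pvG inv = some "NEEDS_ESCALATION")
    (a b c p : Int) : pvStep (pvD a b c p) inv = pvD a b (c + 1) p := by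
  unfold pvStep
  rw [show (PySem.Dict.mk inv).get? "verdict" = some "NEEDS_ESCALATION" from h]
  simp [pvD, PySem.Dict.modify, PySem.Dict.contains, PySem.Dict.getD, PySem.Dict.get?,
    PySem.Dict.insert]

lemma pvStep_other {inv : List (String × String)}
    (h1 : pvG inv ≠ some "TRUE_POSITIVE") (h2 : pvG inv ≠ some "FALSE_POSITIVE")
    (h3 : pvG inv ≠ some "NEEDS_ESCALATION")
    (a b c p : Int) : pvStep (pvD a b c p) inv = pvD a b c (p + 1) := by
  unfold pvStep
  cases hg : (PySem.Dict.mk inv).get? "verdict" with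
  | none =>
    rfl
  | some v =>
    rw [pvG] at h1 h2 h3
    rw [hg] at h1 h2 h3
    have n1 : v ≠ "TRUE_POSITIVE" := fun h => h1 (by rw [h])
    have n2 : v ≠ "FALSE_POSITIVE" := fun h => h2 (by rw [h])
    have n3 : v ≠ "NEEDS_ESCALATION" := fun h => h3 (by rw [h])
    by_cases h4 : v = "pending"
    · subst h4
      simp [pvD, PySem.Dict.modify, PySem.Dict.contains, PySem.Dict.getD, PySem.Dict.get?,
        PySem.Dict.insert]
    · simp [pvD, PySem.Dict.modify, PySem.Dict.contains, PySem.Dict.getD, PySem.Dict.get?,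
        PySem.Dict.insert, Ne.symm n1, Ne.symm n2, Ne.symm n3, Ne.symm h4]

lemma pvFoldl_D (l : List (List (String × String))) (a b c p : Int) :
    l.foldl pvStep (pvD a b c p) =
      pvD (a + (l.map pvG).count (some "TRUE_POSITIVE"))
          (b + (l.map pvG).count (some "FALSE_POSITIVE"))
          (c + (l.map pvG).count (some "NEEDS_ESCALATION"))
          (p + ((l.length : Int) - (l.map pvG).count (some "TRUE_POSITIVE")
                - (l.map pvG).count (some "FALSE_POSITIVE")
                - (l.map pvG).count (some "NEEDS_ESCALATION"))) := by
  induction l generalizing a b c p with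
  | nil => simp
  | cons inv rest ih =>
    simp only [List.foldl_cons, List.map_cons, List.count_cons, List.length_cons]
    by_cases h1 : pvG inv = some "TRUE_POSITIVE"
    · rw [pvStep_tp h1, ih]
      simp only [pvD, PySem.Dict.mk.injEq, List.cons.injEq, Prod.mk.injEq]
      simp [h1]
      omega
    · by_cases h2 : pvG inv = some "FALSE_POSITIVE"
      · rw [pvStep_fp h2, ih]
        simp only [pvD, PySem.Dict.mk.injEq, List.cons.injEq, Prod.mk.injEq]
        simp [h2]
        omega
      · by_cases h3 : pvG inv = some "NEEDS_ESCALATION"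
        · rw [pvStep_ne h3, ih]
          simp only [pvD, PySem.Dict.mk.injEq, List.cons.injEq, Prod.mk.injEq]
          simp [h3]
          omega
        · rw [pvStep_other h1 h2 h3, ih]
          simp only [pvD, PySem.Dict.mk.injEq, List.cons.injEq, Prod.mk.injEq]
          simp [h1, h2, h3]
          omega

-- ===== VERDICT (by name: the statement is the Claim_ definition above) =====
theorem analyze_verdicts_py_spec : Claim_equal_analyze_verdicts_py := by
  intro related _
  show analyze_verdicts_py related = analyze_verdicts_py_alt related
  unfold analyze_verdicts_py analyze_verdicts_py_alt
  have hstart : PySem.Dict.ofList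
      [("TRUE_POSITIVE", (0 : Int)), ("FALSE_POSITIVE", 0), ("NEEDS_ESCALATION", 0), ("pending", 0)]
      = pvD 0 0 0 0 := by decide
  have hfold : related.foldl (fun d inv =>
      let verdict := (PySem.Dict.mk inv).get? "verdict"
      match verdict with
      | some v => if d.contains v then d.modify v 0 (· + 1) else d.modify "pending" 0 (· + 1)
      | none => d.modify "pending" 0 (· + 1)) (pvD 0 0 0 0) = related.foldl pvStep (pvD 0 0 0 0) := rfl
  simp only [hstart, hfold, pvFoldl_D]
  rw [show pvG = (fun inv => (PySem.Dict.mk inv).get? "verdict") from rfl]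
  simp [pvD, PySem.List.count_eq]
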